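-- pv_equiv track=rewrite | github.com/alexyu0/829_project | scripts/loss_stats.py | loss_length_hist
-- ===== SOURCE A (Python) =====
-- def loss_length_hist(data_lines, graph_individual=False):
--     """
--     Returns histogram of bursts of loss experienced
--     """
--     loss_bursts = {}
--     loss_active = False
--     loss_count = 0
--     for (ts, lost) in data_lines:
--         if lost:
--             loss_count += 1
--             if not loss_active:
--                 loss_active = True
--         else:
--             if loss_active:
--                 # reset burst count and write to dict
--                 if loss_count not in loss_bursts:
--                     loss_bursts[loss_count] = 1
--                 else:
--                     loss_bursts[loss_count] += 1
--                 loss_active = False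
--                 loss_count = 0
--
--     return loss_bursts
-- ===== SOURCE B (Python) =====
-- def _runs(flags):
--     """Run-length encode a list of booleans: [(value, run_length), ...]."""
--     runs = []
--     i = 0
--     while i < len(flags):
--         j = i + 1
--         while j < len(flags) and flags[j] == flags[i]:
--             j += 1
--         runs.append((flags[i], j - i))
--         i = j
--     return runs
--
-- def loss_length_hist(data_lines, graph_individual=False):
--     """
--     Returns histogram of bursts of loss experienced
--     """
--     runs = _runs([bool(lost) for (ts, lost) in data_lines])
--     hist = {}
--     # the final run is never committed: a trailing loss burst is unterminated
--     for is_lost, length in runs[:-1]: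
--         if is_lost:
--             hist[length] = hist.get(length, 0) + 1
--     return hist
-- ===== Notes on version B (the rewrite author's own statement) =====
-- stated objective: alternative
-- what changed: Replaces A's single stateful scan (active flag + running counter with in-loop dict commits) by a two-phase decomposition: recursive run-length encoding of the loss flags, then a tally over all runs except the unterminated last one.
import Mathlib
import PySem

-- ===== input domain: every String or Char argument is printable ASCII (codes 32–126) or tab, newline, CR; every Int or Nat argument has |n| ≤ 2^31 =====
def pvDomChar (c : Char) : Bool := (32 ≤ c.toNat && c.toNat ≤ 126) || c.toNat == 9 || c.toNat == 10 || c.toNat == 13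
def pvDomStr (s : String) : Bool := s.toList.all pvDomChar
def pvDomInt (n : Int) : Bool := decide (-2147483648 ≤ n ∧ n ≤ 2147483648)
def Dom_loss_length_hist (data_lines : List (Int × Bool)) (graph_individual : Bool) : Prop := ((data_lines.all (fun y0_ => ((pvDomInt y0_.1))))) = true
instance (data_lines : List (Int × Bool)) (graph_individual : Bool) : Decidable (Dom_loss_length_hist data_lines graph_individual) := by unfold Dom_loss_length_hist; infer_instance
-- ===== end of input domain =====

-- B replaces A's single stateful scan (active flag + running counter with in-loop
-- dict commits) by a two-phase decomposition: run-length encode the loss flags,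
-- then tally the lost runs except the unterminated last run (objective: alternative).

-- ===== PORT A =====
-- state: (loss_bursts, loss_active, loss_count)
def loss_length_hist (data_lines : List (Int × Bool)) (graph_individual : Bool) : List (Int × Int) :=
  let st := data_lines.foldl
    (fun (st : PySem.Dict Int Int × Bool × Int) line =>
      let (bursts, active, count) := st
      if line.2 then
        (bursts, true, count + 1)
      else if active then
        ((if bursts.contains count then bursts.insert count (bursts.getD count 0 + 1)
          else bursts.insert count 1), false, 0)
      else (bursts, active, count))
    (PySem.Dict.empty, false, 0)
  st.1.items

-- ===== PORT B =====
-- _runs: run-length encoding; the inner `while flags[j] == flags[i]` scan is the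
-- takeWhile over the tail, `i = j` is the recursive call on the dropped tail.
def pvRunsB : List Bool → List (Bool × Int)
  | [] => []
  | f :: rest =>
      let n := (rest.takeWhile (fun x => x == f)).length
      (f, (n : Int) + 1) :: pvRunsB (rest.drop n)
termination_by flags => flags.length
decreasing_by
  simp only [List.length_cons, List.length_drop]
  omega

def loss_length_hist_alt (data_lines : List (Int × Bool)) (graph_individual : Bool) : List (Int × Int) :=
  let runs := pvRunsB (data_lines.map (fun p => p.2))
  (runs.dropLast.foldl
    (fun (hist : PySem.Dict Int Int) r =>
      if r.1 then hist.insert r.2 (hist.getD r.2 0 + 1) else hist)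
    PySem.Dict.empty).items

-- ===== PRECONDITION & SPEC =====
def Spec_loss_length_hist (data_lines : List (Int × Bool)) (graph_individual : Bool) (out : List (Int × Int)) : Prop := out = loss_length_hist_alt data_lines graph_individual
instance (data_lines : List (Int × Bool)) (graph_individual : Bool) (out : List (Int × Int)) : Decidable (Spec_loss_length_hist data_lines graph_individual out) := by unfold Spec_loss_length_hist; infer_instance

-- ===== CLAIM (what is proved, stated in full; the proofs are below) =====
def Claim_equal_loss_length_hist : Prop := ∀ (data_lines : List (Int × Bool)) (graph_individual : Bool), Dom_loss_length_hist data_lines graph_individual → Spec_loss_length_hist data_lines graph_individual (loss_length_hist data_lines graph_individual)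

-- ===== LEMMAS AND PROOFS =====

-- A's loop reduced to the flags and a (dict, pending-count) state
def pvFA : List Bool → PySem.Dict Int Int × Int → PySem.Dict Int Int
  | [], (d, _) => d
  | true :: rest, (d, c) => pvFA rest (d, c + 1)
  | false :: rest, (d, c) =>
      if 0 < c then pvFA rest (d.insert c (d.getD c 0 + 1), 0) else pvFA rest (d, c)

-- B's tally of committed runs
def pvTally (d : PySem.Dict Int Int) (runs : List (Bool × Int)) : PySem.Dict Int Int :=
  runs.foldl (fun hist r => if r.1 then hist.insert r.2 (hist.getD r.2 0 + 1) else hist) d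

lemma pvCommit_eq (d : PySem.Dict Int Int) (c : Int) :
    (if d.contains c then d.insert c (d.getD c 0 + 1) else d.insert c 1)
      = d.insert c (d.getD c 0 + 1) := by
  by_cases h : d.contains c = true
  · simp [h]
  · simp only [Bool.not_eq_true] at h
    rw [if_neg (by simp [h]), PySem.Dict.getD_of_not_contains _ _ h]
    norm_num

lemma pvFoldA_eq_pvFA (l : List (Int × Bool)) (d : PySem.Dict Int Int) (c : Int) (hc : 0 ≤ c) :
    (l.foldl
      (fun (st : PySem.Dict Int Int × Bool × Int) line =>
        let (bursts, active, count) := st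
        if line.2 then
          (bursts, true, count + 1)
        else if active then
          ((if bursts.contains count then bursts.insert count (bursts.getD count 0 + 1)
            else bursts.insert count 1), false, 0)
        else (bursts, active, count))
      (d, decide (0 < c), c)).1 = pvFA (l.map Prod.snd) (d, c) := by
  induction l generalizing d c with
  | nil => simp [pvFA]
  | cons p rest ih =>
    obtain ⟨ts, lost⟩ := p
    cases lost with
    | true =>
      have h1 : decide (0 < c + 1) = true := by simp; omega
      have ih' := ih d (c + 1) (by omega)
      rw [h1] at ih'
      simpa [pvFA] using ih'
    | false =>
      by_cases hpos : 0 < c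
      · have h1 : decide (0 < c) = true := by simpa using hpos
        have h0 : decide ((0:Int) < 0) = false := by simp
        simp only [List.foldl_cons, List.map_cons, pvFA, if_pos hpos, h1, pvCommit_eq]
        simpa [pvCommit_eq, h0] using ih (d.insert c (d.getD c 0 + 1)) 0 le_rfl
      · have hc0 : c = 0 := le_antisymm (not_lt.mp hpos) hc
        subst hc0
        have h0 : decide ((0:Int) < 0) = false := by simp
        simp only [List.foldl_cons, List.map_cons, pvFA, if_neg hpos, h0, Bool.false_eq_true,
          if_false]
        simpa [h0] using ih d 0 le_rfl

lemma pvFA_replicate_true (k : Nat) (rest : List Bool) (d : PySem.Dict Int Int) (c : Int) :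
    pvFA (List.replicate k true ++ rest) (d, c) = pvFA rest (d, c + k) := by
  induction k generalizing c with
  | zero => simp
  | succ k ih =>
    simp only [List.replicate_succ, List.cons_append, pvFA, ih]
    congr 1
    push_cast
    ring_nf

lemma pvFA_replicate_false (k : Nat) (rest : List Bool) (d : PySem.Dict Int Int) :
    pvFA (List.replicate k false ++ rest) (d, 0) = pvFA rest (d, 0) := by
  induction k with
  | zero => simp
  | succ k ih => simp [List.replicate_succ, pvFA, ih]

lemma pvTakeWhile_eq_replicate (f : Bool) (l : List Bool) :
    l.takeWhile (fun x => x == f) = List.replicate (l.takeWhile (fun x => x == f)).length f := by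
  rw [List.eq_replicate_iff]
  exact ⟨rfl, fun b hb => by simpa using List.mem_takeWhile_imp hb⟩

lemma pvRunsB_replicate_true (k : Nat) (l : List Bool) (hl : l.head? ≠ some true) (hk : 0 < k) :
    pvRunsB (List.replicate k true ++ l) = (true, (k : Int)) :: pvRunsB l := by
  obtain ⟨k, rfl⟩ : ∃ m, k = m + 1 := ⟨k - 1, by omega⟩
  rw [List.replicate_succ, List.cons_append, pvRunsB]
  have htw : ((List.replicate k true ++ l).takeWhile (fun x => x == true))
      = List.replicate k true ++ l.takeWhile (fun x => x == true) := by
    rw [List.takeWhile_append]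
    simp
  have hltw : l.takeWhile (fun x => x == true) = [] := by
    cases l with
    | nil => rfl
    | cons a as =>
      cases a
      · simp [List.takeWhile]
      · simp at hl
  rw [htw, hltw]
  simp only [List.append_nil, List.length_replicate]
  rw [List.drop_append_of_le_length (by simp)]
  simp

lemma pvTally_dropLast_cons_false (d : PySem.Dict Int Int) (k : Int) (R : List (Bool × Int)) :
    pvTally d (((false, k) :: R).dropLast) = pvTally d R.dropLast := by
  cases R with
  | nil => rfl
  | cons r rs => simp [List.dropLast_cons_of_ne_nil, pvTally]

lemma pvDrop_takeWhile (f : Bool) (l : List Bool) :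
    l.drop (l.takeWhile (fun x => x == f)).length = l.dropWhile (fun x => x == f) := by
  induction l with
  | nil => rfl
  | cons a as ih =>
    by_cases ha : (a == f) = true
    · simp [ha, ih]
    · simp [ha]

lemma pvSplit (f : Bool) (l : List Bool) :
    l = List.replicate (l.takeWhile (fun x => x == f)).length f
        ++ l.drop (l.takeWhile (fun x => x == f)).length := by
  rw [pvDrop_takeWhile]
  conv_lhs => rw [← List.takeWhile_append_dropWhile (p := fun x => x == f) (l := l)]
  congr 1
  exact pvTakeWhile_eq_replicate f l

lemma pvTally_cons_true (d : PySem.Dict Int Int) (k : Int) (R : List (Bool × Int)) :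
    pvTally d ((true, k) :: R) = pvTally (d.insert k (d.getD k 0 + 1)) R := by
  simp [pvTally]

lemma pvMain (flags : List Bool) :
    ∀ (d : PySem.Dict Int Int) (c : Nat),
      pvFA flags (d, (c : Int)) = pvTally d (pvRunsB (List.replicate c true ++ flags)).dropLast := by
  induction flags using pvRunsB.induct with
  | case1 =>
    intro d c
    cases c with
    | zero => simp [pvRunsB, pvFA, pvTally]
    | succ c =>
      rw [pvRunsB_replicate_true (c + 1) [] (by simp) (by omega)]
      simp [pvRunsB, pvFA, pvTally]
  | case2 f rest n ih =>
    intro d c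
    cases f with
    | true =>
      have hflags : List.replicate c true ++ true :: rest
          = List.replicate (c + 1 + (rest.takeWhile (fun x => x == true)).length) true
              ++ rest.drop (rest.takeWhile (fun x => x == true)).length := by
        conv_lhs => rw [pvSplit true rest]
        rw [show c + 1 + (rest.takeWhile (fun x => x == true)).length
              = c + ((rest.takeWhile (fun x => x == true)).length + 1) by omega,
            List.replicate_add, List.replicate_succ]
        simp
      have hcast : (c : Int) + 1 + ((rest.takeWhile (fun x => x == true)).length : Int)
          = ((c + 1 + (rest.takeWhile (fun x => x == true)).length : Nat) : Int) := by
        push_cast; ring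
      calc pvFA (true :: rest) (d, (c : Int))
          = pvFA rest (d, (c : Int) + 1) := by simp [pvFA]
        _ = pvFA (List.replicate (rest.takeWhile (fun x => x == true)).length true
              ++ rest.drop (rest.takeWhile (fun x => x == true)).length) (d, (c : Int) + 1) := by
            conv_lhs => rw [pvSplit true rest]
        _ = pvFA (rest.drop (rest.takeWhile (fun x => x == true)).length)
              (d, ((c + 1 + (rest.takeWhile (fun x => x == true)).length : Nat) : Int)) := by
            rw [pvFA_replicate_true, hcast]
        _ = pvTally d (pvRunsB (List.replicate c true ++ true :: rest)).dropLast := by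
            rw [ih d (c + 1 + (rest.takeWhile (fun x => x == true)).length), hflags]
    | false =>
      have hruns : pvRunsB (false :: rest)
          = (false, ((rest.takeWhile (fun x => x == false)).length : Int) + 1)
              :: pvRunsB (rest.drop (rest.takeWhile (fun x => x == false)).length) := by
        rw [pvRunsB]
      by_cases hc : c = 0
      · subst hc
        calc pvFA (false :: rest) (d, ((0 : Nat) : Int))
            = pvFA rest (d, 0) := by norm_num [pvFA]
          _ = pvFA (rest.drop (rest.takeWhile (fun x => x == false)).length) (d, 0) := by
              conv_lhs => rw [pvSplit false rest]
              rw [pvFA_replicate_false]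
          _ = pvTally d (pvRunsB (rest.drop (rest.takeWhile (fun x => x == false)).length)).dropLast := by
              have h0 := ih d 0
              rw [Nat.cast_zero, List.replicate_zero, List.nil_append] at h0
              exact h0
          _ = pvTally d (pvRunsB (List.replicate 0 true ++ false :: rest)).dropLast := by
              rw [List.replicate_zero, List.nil_append, hruns, pvTally_dropLast_cons_false]
      · have hcpos : (0 : Int) < (c : Int) := by omega
        calc pvFA (false :: rest) (d, (c : Int))
            = pvFA rest (d.insert (c : Int) (d.getD (c : Int) 0 + 1), 0) := by
              simp only [pvFA]
              rw [if_pos hcpos]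
          _ = pvFA (rest.drop (rest.takeWhile (fun x => x == false)).length)
                (d.insert (c : Int) (d.getD (c : Int) 0 + 1), 0) := by
              conv_lhs => rw [pvSplit false rest]
              rw [pvFA_replicate_false]
          _ = pvTally (d.insert (c : Int) (d.getD (c : Int) 0 + 1))
                (pvRunsB (rest.drop (rest.takeWhile (fun x => x == false)).length)).dropLast := by
              have h0 := ih (d.insert (c : Int) (d.getD (c : Int) 0 + 1)) 0
              rw [Nat.cast_zero, List.replicate_zero, List.nil_append] at h0
              exact h0
          _ = pvTally d (pvRunsB (List.replicate c true ++ false :: rest)).dropLast := by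
              rw [pvRunsB_replicate_true c (false :: rest) (by simp) (by omega), hruns,
                List.dropLast_cons_of_ne_nil (by simp), pvTally_cons_true,
                pvTally_dropLast_cons_false]

-- ===== VERDICT (by name: the statement is the Claim_ definition above) =====
theorem loss_length_hist_spec : Claim_equal_loss_length_hist := by
  intro data_lines graph_individual _
  simp only [Spec_loss_length_hist, loss_length_hist, loss_length_hist_alt]
  have h := pvFoldA_eq_pvFA data_lines PySem.Dict.empty 0 le_rfl
  norm_num at h
  rw [h]
  have h2 := pvMain (data_lines.map Prod.snd) PySem.Dict.empty 0
  norm_num at h2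
  rw [h2]
  rfl
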